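-- pv_equiv track=rewrite | github.com/ADHIRAJ413/my-openenv | inference.py | _get_resp
-- ===== SOURCE A (Python) =====
-- def _needs_resp(subject: str, body: str) -> bool:
--     text = f"{subject} {body}".lower()
--     if any(sig in text for sig in ["no action required", "automated confirmation", "keep this for your records", "make sure everything is ready", "all-clear notification", "welcome aboard"]):
--         return False
--     # Use individual keywords for higher coverage
--     signals = ["let me know", "contact us", "any questions", "schedule", "review", "acknowledge", "approve", "respond", "reply", "reach out", "bug", "feature", "performance", "policy", "partnership", "renewal", "quote"]
--     return any(sig in text for sig in signals)
--
-- def _get_resp(subject: str, body: str, category: str, sender_name: str) -> str: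
--     if not _needs_resp(subject, body): return ""
--     text = f"{subject} {body}".lower()
--
--     # Prefix to hit professionalism markers and length
--     prefix = f"Dear {sender_name},\n\nThank you for reaching out to our team. We appreciate your email and would like to provide a helpful response. "
--     suffix = "\n\nPlease let us know if you have any further questions. We look forward to working with you.\n\nBest regards,\nTriage Team"
--
--     if category == "billing":
--         if "overdue" in text or "payment" in text:
--             return prefix + "We acknowledge receipt of this overdue invoice. We are currently processing the payment and will provide a payment timeline shortly. mention processing" + suffix
--         if "pricing" in text:
--             return prefix + "We acknowledge the pricing changes you've mentioned. We have a few clarifying questions regarding the volume discounts. We will ask clarifying questions during our review." + suffix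
--         return prefix + "We acknowledge receipt of the expense report. We will review it for approval and either approve or request changes if needed." + suffix
--
--     if category == "technical":
--         if any(kw in text for kw in ["down", "outage", "unresponsive"]):
--             return prefix + "We acknowledge the urgency of this production outage. We will provide an ETA for resolution as soon as possible. Also, we will mention escalation to the engineering leadership." + suffix
--         if "bug" in text:
--             return prefix + "We acknowledge the bug report. Our team will provide a timeline for fix within the next day. In the meantime, we suggest a workaround of refreshing the page." + suffix
--         return prefix + "We acknowledge the request for this new feature. We will mention this during our next roadmap review with the product team." + suffix
--
--     if category == "sales":
--         if "partnership" in text: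
--             return prefix + "We express interest in this partnership opportunity. Could you suggest timing for a brief call to discuss synergies?" + suffix
--         if "renewal" in text:
--             return prefix + "We acknowledge the annual renewal notice. We would like to schedule a call to discuss terms or any new changes." + suffix
--         return prefix + "We will review pricing for the provided quote. We will confirm or negotiate the terms once our internal review is complete." + suffix
--
--     if category == "hr":
--         if "performance" in text:
--             return prefix + "We acknowledge the deadline for the annual performance review. We will confirm our submission plan to ensure we meet the target date." + suffix
--         return prefix + "We acknowledge receipt of the new company policy. We confirm our review of the updated documentation thoroughly." + suffix
--
--     return prefix + "We acknowledge receipt of your message and will review it shortly. Thank you for your patience." + suffix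
-- ===== SOURCE B (Python) =====
-- # Flat first-match decision list (wildcard rules replace per-category dispatch and chains); same texts.
-- def _needs_resp(subject: str, body: str) -> bool:
--     text = f"{subject} {body}".lower()
--     if any(sig in text for sig in ["no action required", "automated confirmation", "keep this for your records", "make sure everything is ready", "all-clear notification", "welcome aboard"]):
--         return False
--     signals = ["let me know", "contact us", "any questions", "schedule", "review", "acknowledge", "approve", "respond", "reply", "reach out", "bug", "feature", "performance", "policy", "partnership", "renewal", "quote"]
--     return any(sig in text for sig in signals)
--
-- # Each rule: (category or None = any category, trigger keywords ([] = always fires), body).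
-- # Scanned top to bottom; the first rule whose category guard and keyword guard both hold wins.
-- _DECISION_LIST = [
--     ("billing", ["overdue", "payment"], "We acknowledge receipt of this overdue invoice. We are currently processing the payment and will provide a payment timeline shortly. mention processing"),
--     ("billing", ["pricing"], "We acknowledge the pricing changes you've mentioned. We have a few clarifying questions regarding the volume discounts. We will ask clarifying questions during our review."),
--     ("billing", [], "We acknowledge receipt of the expense report. We will review it for approval and either approve or request changes if needed."),
--     ("technical", ["down", "outage", "unresponsive"], "We acknowledge the urgency of this production outage. We will provide an ETA for resolution as soon as possible. Also, we will mention escalation to the engineering leadership."),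
--     ("technical", ["bug"], "We acknowledge the bug report. Our team will provide a timeline for fix within the next day. In the meantime, we suggest a workaround of refreshing the page."),
--     ("technical", [], "We acknowledge the request for this new feature. We will mention this during our next roadmap review with the product team."),
--     ("sales", ["partnership"], "We express interest in this partnership opportunity. Could you suggest timing for a brief call to discuss synergies?"),
--     ("sales", ["renewal"], "We acknowledge the annual renewal notice. We would like to schedule a call to discuss terms or any new changes."),
--     ("sales", [], "We will review pricing for the provided quote. We will confirm or negotiate the terms once our internal review is complete."),
--     ("hr", ["performance"], "We acknowledge the deadline for the annual performance review. We will confirm our submission plan to ensure we meet the target date."),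
--     ("hr", [], "We acknowledge receipt of the new company policy. We confirm our review of the updated documentation thoroughly."),
--     (None, [], "We acknowledge receipt of your message and will review it shortly. Thank you for your patience."),
-- ]
--
-- def _get_resp(subject: str, body: str, category: str, sender_name: str) -> str:
--     if not _needs_resp(subject, body):
--         return ""
--     text = f"{subject} {body}".lower()
--     prefix = f"Dear {sender_name},\n\nThank you for reaching out to our team. We appreciate your email and would like to provide a helpful response. "
--     suffix = "\n\nPlease let us know if you have any further questions. We look forward to working with you.\n\nBest regards,\nTriage Team"
--     chosen = next(b for cat, kws, b in _DECISION_LIST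
--                   if (cat is None or cat == category)
--                   and (not kws or any(kw in text for kw in kws)))
--     return prefix + chosen + suffix
-- ===== Notes on version B (the rewrite author's own statement) =====
-- stated objective: alternative
-- what changed: Replaces A's category dispatch with nested if/elif chains by a single flat decision list of (category-guard-or-wildcard, trigger keywords, body) rules scanned once first-match-wins, with per-category and global defaults encoded as keywordless / wildcard rules.
import Mathlib
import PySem

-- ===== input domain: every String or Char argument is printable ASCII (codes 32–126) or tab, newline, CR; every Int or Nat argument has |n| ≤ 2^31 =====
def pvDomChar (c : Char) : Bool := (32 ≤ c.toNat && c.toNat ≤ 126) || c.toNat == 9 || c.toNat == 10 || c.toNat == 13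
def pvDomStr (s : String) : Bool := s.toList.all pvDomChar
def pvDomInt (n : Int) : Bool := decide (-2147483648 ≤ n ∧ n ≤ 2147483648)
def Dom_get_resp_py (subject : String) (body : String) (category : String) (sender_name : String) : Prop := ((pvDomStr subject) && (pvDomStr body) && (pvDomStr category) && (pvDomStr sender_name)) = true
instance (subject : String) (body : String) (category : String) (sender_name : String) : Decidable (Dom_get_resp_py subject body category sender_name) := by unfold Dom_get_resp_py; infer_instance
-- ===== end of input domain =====

-- B replaces A's per-category dispatch + nested if/elif chains by ONE flat first-match decision list
-- (wildcard-category and keywordless rules encode the defaults); objective: alternative. Texts byte-identical.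

-- ===== PORT A =====
-- shared helper: both Pythons define the identical _needs_resp
def needs_resp_py (subject : String) (body : String) : Bool :=
  let text := PySem.Str.lower (subject ++ " " ++ body)
  if (["no action required", "automated confirmation", "keep this for your records", "make sure everything is ready", "all-clear notification", "welcome aboard"]).any (fun sig => PySem.Str.isIn sig text) then
    false
  else
    (["let me know", "contact us", "any questions", "schedule", "review", "acknowledge", "approve", "respond", "reply", "reach out", "bug", "feature", "performance", "policy", "partnership", "renewal", "quote"]).any (fun sig => PySem.Str.isIn sig text)

def get_resp_py (subject : String) (body : String) (category : String) (sender_name : String) : String :=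
  if !needs_resp_py subject body then "" else
  let text := PySem.Str.lower (subject ++ " " ++ body)
  let pre := "Dear " ++ sender_name ++ ",\n\nThank you for reaching out to our team. We appreciate your email and would like to provide a helpful response. "
  let suf := "\n\nPlease let us know if you have any further questions. We look forward to working with you.\n\nBest regards,\nTriage Team"
  if category == "billing" then
    (if PySem.Str.isIn "overdue" text || PySem.Str.isIn "payment" text then
      pre ++ "We acknowledge receipt of this overdue invoice. We are currently processing the payment and will provide a payment timeline shortly. mention processing" ++ suf
    else if PySem.Str.isIn "pricing" text then
      pre ++ "We acknowledge the pricing changes you've mentioned. We have a few clarifying questions regarding the volume discounts. We will ask clarifying questions during our review." ++ suf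
    else
      pre ++ "We acknowledge receipt of the expense report. We will review it for approval and either approve or request changes if needed." ++ suf)
  else if category == "technical" then
    (if (["down", "outage", "unresponsive"]).any (fun kw => PySem.Str.isIn kw text) then
      pre ++ "We acknowledge the urgency of this production outage. We will provide an ETA for resolution as soon as possible. Also, we will mention escalation to the engineering leadership." ++ suf
    else if PySem.Str.isIn "bug" text then
      pre ++ "We acknowledge the bug report. Our team will provide a timeline for fix within the next day. In the meantime, we suggest a workaround of refreshing the page." ++ suf
    else
      pre ++ "We acknowledge the request for this new feature. We will mention this during our next roadmap review with the product team." ++ suf)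
  else if category == "sales" then
    (if PySem.Str.isIn "partnership" text then
      pre ++ "We express interest in this partnership opportunity. Could you suggest timing for a brief call to discuss synergies?" ++ suf
    else if PySem.Str.isIn "renewal" text then
      pre ++ "We acknowledge the annual renewal notice. We would like to schedule a call to discuss terms or any new changes." ++ suf
    else
      pre ++ "We will review pricing for the provided quote. We will confirm or negotiate the terms once our internal review is complete." ++ suf)
  else if category == "hr" then
    (if PySem.Str.isIn "performance" text then
      pre ++ "We acknowledge the deadline for the annual performance review. We will confirm our submission plan to ensure we meet the target date." ++ suf
    else
      pre ++ "We acknowledge receipt of the new company policy. We confirm our review of the updated documentation thoroughly." ++ suf)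
  else
    pre ++ "We acknowledge receipt of your message and will review it shortly. Thank you for your patience." ++ suf

-- ===== PORT B =====
-- the flat _DECISION_LIST of Source B: (category guard (none = wildcard), trigger keywords ([] = always), body)
def pvDecisionList : List (Option String × List String × String) := [
  (some "billing", ["overdue", "payment"], "We acknowledge receipt of this overdue invoice. We are currently processing the payment and will provide a payment timeline shortly. mention processing"),
  (some "billing", ["pricing"], "We acknowledge the pricing changes you've mentioned. We have a few clarifying questions regarding the volume discounts. We will ask clarifying questions during our review."),
  (some "billing", [], "We acknowledge receipt of the expense report. We will review it for approval and either approve or request changes if needed."),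
  (some "technical", ["down", "outage", "unresponsive"], "We acknowledge the urgency of this production outage. We will provide an ETA for resolution as soon as possible. Also, we will mention escalation to the engineering leadership."),
  (some "technical", ["bug"], "We acknowledge the bug report. Our team will provide a timeline for fix within the next day. In the meantime, we suggest a workaround of refreshing the page."),
  (some "technical", [], "We acknowledge the request for this new feature. We will mention this during our next roadmap review with the product team."),
  (some "sales", ["partnership"], "We express interest in this partnership opportunity. Could you suggest timing for a brief call to discuss synergies?"),
  (some "sales", ["renewal"], "We acknowledge the annual renewal notice. We would like to schedule a call to discuss terms or any new changes."),
  (some "sales", [], "We will review pricing for the provided quote. We will confirm or negotiate the terms once our internal review is complete."),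
  (some "hr", ["performance"], "We acknowledge the deadline for the annual performance review. We will confirm our submission plan to ensure we meet the target date."),
  (some "hr", [], "We acknowledge receipt of the new company policy. We confirm our review of the updated documentation thoroughly."),
  (none, [], "We acknowledge receipt of your message and will review it shortly. Thank you for your patience.")]

-- Source B's next(... for ... if ...) over the decision list; the final wildcard rule always matches,
-- so the [] case (Python's StopIteration) is unreachable and "" is never produced.
def pvFirstMatch (category : String) (text : String) : List (Option String × List String × String) → String
  | [] => ""
  | (cat?, kws, b) :: rest =>
      if (match cat? with | none => true | some c => c == category)
          && (kws.isEmpty || kws.any (fun kw => PySem.Str.isIn kw text)) then b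
      else pvFirstMatch category text rest

def get_resp_py_alt (subject : String) (body : String) (category : String) (sender_name : String) : String :=
  if !needs_resp_py subject body then "" else
  let text := PySem.Str.lower (subject ++ " " ++ body)
  let pre := "Dear " ++ sender_name ++ ",\n\nThank you for reaching out to our team. We appreciate your email and would like to provide a helpful response. "
  let suf := "\n\nPlease let us know if you have any further questions. We look forward to working with you.\n\nBest regards,\nTriage Team"
  pre ++ pvFirstMatch category text pvDecisionList ++ suf

-- ===== PRECONDITION & SPEC =====
def Spec_get_resp_py (subject : String) (body : String) (category : String) (sender_name : String) (out : String) : Prop := out = get_resp_py_alt subject body category sender_name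
instance (subject : String) (body : String) (category : String) (sender_name : String) (out : String) : Decidable (Spec_get_resp_py subject body category sender_name out) := by unfold Spec_get_resp_py; infer_instance

-- ===== CLAIM (what is proved, stated in full; the proofs are below) =====
def Claim_equal_get_resp_py : Prop := ∀ (subject : String) (body : String) (category : String) (sender_name : String), Dom_get_resp_py subject body category sender_name → Spec_get_resp_py subject body category sender_name (get_resp_py subject body category sender_name)

-- ===== LEMMAS AND PROOFS =====

-- ===== VERDICT (by name: the statement is the Claim_ definition above) =====
theorem get_resp_py_spec : Claim_equal_get_resp_py := by
  intro subject body category sender_name _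
  unfold Spec_get_resp_py get_resp_py get_resp_py_alt
  by_cases hn : needs_resp_py subject body
  · simp only [hn, Bool.not_true, Bool.false_eq_true, if_false]
    by_cases h1 : category = "billing"
    · subst h1
      simp only [pvDecisionList, pvFirstMatch, List.any_cons, List.any_nil, List.isEmpty_cons,
        List.isEmpty_nil, Bool.or_false, Bool.false_or, beq_self_eq_true, Bool.true_and]
      split_ifs <;> simp_all
    · by_cases h2 : category = "technical"
      · subst h2
        have e1 : (("billing" : String) == "technical") = false := by decide
        simp only [pvDecisionList, pvFirstMatch, List.any_cons, List.any_nil, List.isEmpty_cons,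
          List.isEmpty_nil, Bool.or_false, Bool.false_or, beq_self_eq_true, Bool.true_and, e1,
          Bool.false_and]
        split_ifs <;> simp_all
      · by_cases h3 : category = "sales"
        · subst h3
          have e1 : (("billing" : String) == "sales") = false := by decide
          have e2 : (("technical" : String) == "sales") = false := by decide
          simp only [pvDecisionList, pvFirstMatch, List.any_cons, List.any_nil, List.isEmpty_cons,
            List.isEmpty_nil, Bool.or_false, Bool.false_or, beq_self_eq_true, Bool.true_and, e1, e2,
            Bool.false_and]
          split_ifs <;> simp_all
        · by_cases h4 : category = "hr"
          · subst h4
            have e1 : (("billing" : String) == "hr") = false := by decide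
            have e2 : (("technical" : String) == "hr") = false := by decide
            have e3 : (("sales" : String) == "hr") = false := by decide
            simp only [pvDecisionList, pvFirstMatch, List.any_cons, List.any_nil, List.isEmpty_cons,
              List.isEmpty_nil, Bool.or_false, Bool.false_or, beq_self_eq_true, Bool.true_and, e1, e2, e3,
              Bool.false_and]
            split_ifs <;> simp_all
          · have e1 : (("billing" : String) == category) = false := by simp [Ne.symm h1]
            have e2 : (("technical" : String) == category) = false := by simp [Ne.symm h2]
            have e3 : (("sales" : String) == category) = false := by simp [Ne.symm h3]
            have e4 : (("hr" : String) == category) = false := by simp [Ne.symm h4]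
            simp only [pvDecisionList, pvFirstMatch, List.isEmpty_nil, e1, e2, e3, e4,
              Bool.false_and, Bool.true_and, Bool.true_or, if_true]
            simp [h1, h2, h3, h4]
  · simp [hn]
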